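-- pv_equiv track=rewrite | github.com/Arsen1302/Code-copy-detector | TestData/solutions/problem_527_3_1.py | solution_527_3_1
-- ===== SOURCE A (Python) =====
-- from typing import List
--
-- def solution_527_3_1(strs: List[str]) -> int:
--
--     def solution_527_3_2(a, b):
--         cnt = 0
--         for a_, b_ in zip(a, b):
--             if a_ != b_:
--                 cnt += 1
--         return cnt <= 2
--     u = [i for i in range(len(strs))]
--
--     def solution_527_3_3(i):
--         parent = u[i]
--         if parent == i:
--             return i
--         else:
--             root = solution_527_3_3(parent)
--             u[parent] = root
--             return root
--
--     for i in range(len(strs)):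
--         for j in range(i+1, len(strs)):
--             a_root = solution_527_3_3(i)
--             b_root = solution_527_3_3(j)
--             if a_root != b_root:
--                 if solution_527_3_2(strs[i], strs[j]):
--                     u[a_root] = b_root
--
--     cnt = set()
--     for i in range(len(strs)):
--         cnt.add(solution_527_3_3(i))
--     return len(cnt)
-- ===== SOURCE B (Python) =====
-- from typing import List
--
-- def solution_527_3_1(strs: List[str]) -> int:
--     def similar(a, b):
--         return sum(x != y for x, y in zip(a, b)) <= 2
--     n = len(strs)
--     labels = list(range(n))
--     for i in range(n):
--         for j in range(i + 1, n):
--             if labels[i] != labels[j] and similar(strs[i], strs[j]):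
--                 old, new = labels[i], labels[j]
--                 labels = [new if l == old else l for l in labels]
--     return len(set(labels))
-- ===== Notes on version B (the rewrite author's own statement) =====
-- stated objective: simpler
-- what changed: Replaces the recursive union-find with path compression (parent forest, recursive find that mutates during reads, distinct-root count) by flat label propagation: each merge rewrites all occurrences of one label in a plain label list, and the answer is the number of distinct labels.
import Mathlib
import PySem

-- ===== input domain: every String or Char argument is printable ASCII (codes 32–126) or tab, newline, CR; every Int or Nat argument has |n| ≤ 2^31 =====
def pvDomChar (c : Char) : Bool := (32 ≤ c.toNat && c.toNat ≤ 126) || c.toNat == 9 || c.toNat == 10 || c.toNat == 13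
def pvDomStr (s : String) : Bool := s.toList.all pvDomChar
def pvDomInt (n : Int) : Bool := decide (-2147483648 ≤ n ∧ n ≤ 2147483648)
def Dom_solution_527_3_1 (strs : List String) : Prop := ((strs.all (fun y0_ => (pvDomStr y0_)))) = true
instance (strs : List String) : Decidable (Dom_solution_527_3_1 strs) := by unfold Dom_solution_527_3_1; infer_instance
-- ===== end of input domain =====

-- B replaces A's recursive union-find (parent forest, path compression, distinct-root count)
-- by flat label propagation (each merge rewrites one label everywhere; count distinct labels);
-- objective: simpler — no recursion, no mutation-during-read forest.

-- ===== PORT A =====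
-- solution_527_3_2: count mismatches over zip, test ≤ 2
def pvSim (a b : String) : Bool :=
  decide (((a.toList.zip b.toList).foldl
      (fun (cnt : Int) p => if p.1 ≠ p.2 then cnt + 1 else cnt) 0) ≤ 2)

-- solution_527_3_3: recursive find with path compression.  Python recursion terminates because
-- the parent forest is acyclic; here fuel n+1 bounds the recursion depth and (proved below,
-- pvFind_spec) is never exhausted on the reachable states.  u.getD i 0: index always in range.
def pvFind : Nat → List Nat → Nat → List Nat × Nat
  | 0, u, i => (u, i)
  | fuel+1, u, i =>
    let parent := u.getD i 0
    if parent = i then (u, i)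
    else
      let f := pvFind fuel u parent
      (f.1.set parent f.2, f.2)

-- body of the i,j pair loop
def pvPairA (strs : List String) (n i j : Nat) (u : List Nat) : List Nat :=
  let f1 := pvFind (n+1) u i
  let f2 := pvFind (n+1) f1.1 j
  if f1.2 ≠ f2.2 then
    if pvSim (strs.getD i "") (strs.getD j "") then f2.1.set f1.2 f2.2 else f2.1
  else f2.1

def solution_527_3_1 (strs : List String) : Int :=
  let n := strs.length
  let u := (List.range n).foldl
      (fun u i => (List.range' (i+1) (n - (i+1))).foldl (fun u j => pvPairA strs n i j u) u)
      (List.range n)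
  let fin := (List.range n).foldl
      (fun (st : List Nat × PySem.Set Nat) i =>
        let f := pvFind (n+1) st.1 i
        (f.1, PySem.Set.add st.2 f.2))
      (u, ([] : PySem.Set Nat))
  (fin.2.length : Int)

-- ===== PORT B =====
def pvSimAlt (a b : String) : Bool :=
  decide ((a.toList.zip b.toList).countP (fun p => p.1 != p.2) ≤ 2)

def pvPairB (strs : List String) (i j : Nat) (lab : List Nat) : List Nat :=
  if lab.getD i 0 ≠ lab.getD j 0 ∧ pvSimAlt (strs.getD i "") (strs.getD j "") then
    lab.map (fun l => if l = lab.getD i 0 then lab.getD j 0 else l)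
  else lab

def solution_527_3_1_alt (strs : List String) : Int :=
  let n := strs.length
  let lab := (List.range n).foldl
      (fun lab i => (List.range' (i+1) (n - (i+1))).foldl (fun lab j => pvPairB strs i j lab) lab)
      (List.range n)
  ((PySem.Set.ofList lab).length : Int)

-- ===== PRECONDITION & SPEC =====
def Spec_solution_527_3_1 (strs : List String) (out : Int) : Prop := out = solution_527_3_1_alt strs
instance (strs : List String) (out : Int) : Decidable (Spec_solution_527_3_1 strs out) := by unfold Spec_solution_527_3_1; infer_instance

-- ===== CLAIM (what is proved, stated in full; the proofs are below) =====
def Claim_equal_solution_527_3_1 : Prop := ∀ (strs : List String), Dom_solution_527_3_1 strs → Spec_solution_527_3_1 strs (solution_527_3_1 strs)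

-- ===== LEMMAS AND PROOFS =====

-- parent function of the forest
def pvPar (u : List Nat) (i : Nat) : Nat := u.getD i 0
-- k-fold parent iteration
def pvItp (u : List Nat) : Nat → Nat → Nat
  | 0, i => i
  | k+1, i => pvItp u k (pvPar u i)
def pvIsRoot (u : List Nat) (i : Nat) : Prop := pvPar u i = i
-- well-formed forest on n nodes: in-bounds parents, every chain reaches a root within n steps
def pvGood (u : List Nat) (n : Nat) : Prop :=
  u.length = n ∧ ∀ i < n, pvPar u i < n ∧ pvIsRoot u (pvItp u n i)

theorem pvItp_add (u : List Nat) (a b i : Nat) :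
    pvItp u (a + b) i = pvItp u b (pvItp u a i) := by
  induction a generalizing i with
  | zero => simp [pvItp]
  | succ a ih =>
      have : a + 1 + b = (a + b) + 1 := by omega
      rw [this]
      simp only [pvItp]
      exact ih (pvPar u i)

theorem pvItp_root (u : List Nat) {i : Nat} (h : pvIsRoot u i) (k : Nat) :
    pvItp u k i = i := by
  induction k with
  | zero => rfl
  | succ k ih => simp only [pvItp]; rw [h]; exact ih

theorem pvRoot_unique (u : List Nat) {a b i : Nat}
    (ha : pvIsRoot u (pvItp u a i)) (hb : pvIsRoot u (pvItp u b i)) :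
    pvItp u a i = pvItp u b i := by
  rcases Nat.le_total a b with h | h
  · have : b = a + (b - a) := by omega
    rw [this, pvItp_add, pvItp_root u ha] at hb ⊢
  · have : a = b + (a - b) := by omega
    rw [this, pvItp_add, pvItp_root u hb] at ha ⊢

theorem pvItp_lt {u : List Nat} {n : Nat} (hb : ∀ x < n, pvPar u x < n)
    {i : Nat} (hi : i < n) (k : Nat) : pvItp u k i < n := by
  induction k generalizing i with
  | zero => exact hi
  | succ k ih => exact ih (hb i hi)

theorem pvShrink_le {u : List Nat} {n m i : Nat} (hmn : m ≤ n)
    (h : pvIsRoot u (pvItp u m i)) : pvIsRoot u (pvItp u n i) := by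
  have : n = m + (n - m) := by omega
  rw [this, pvItp_add, pvItp_root u h]
  exact h

theorem pvItp_period {u : List Nat} {P x : Nat} (h : pvItp u P x = x) (t : Nat) :
    pvItp u (t * P) x = x := by
  induction t with
  | zero => simp [pvItp]
  | succ t ih =>
      have : (t + 1) * P = t * P + P := by ring
      rw [this, pvItp_add, ih, h]

theorem pvShrink_aux {u : List Nat} {n i m : Nat} (hb : ∀ x < n, pvPar u x < n)
    (hi : i < n) (h : pvIsRoot u (pvItp u m i)) {a b : Nat} (han : a ≤ n)
    (hab : a < b) (heq : pvItp u a i = pvItp u b i) : pvIsRoot u (pvItp u n i) := by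
  have hP : pvItp u (b - a) (pvItp u a i) = pvItp u a i := by
    conv_lhs => rw [← pvItp_add]
    rw [show a + (b - a) = b by omega, ← heq]
  rcases Nat.le_total m a with hma | ham
  · exact pvShrink_le (le_trans hma han) h
  · have hr : pvItp u (m - a) (pvItp u a i) = pvItp u m i := by
      rw [← pvItp_add, show a + (m - a) = m by omega]
    have hper := pvItp_period hP m
    have hge : m - a ≤ m * (b - a) := by
      have : 1 ≤ b - a := by omega
      calc m - a ≤ m := by omega
        _ = m * 1 := by omega
        _ ≤ m * (b - a) := Nat.mul_le_mul_left m this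
    have : pvItp u (m * (b - a)) (pvItp u a i) = pvItp u m i := by
      rw [show m * (b - a) = (m - a) + (m * (b - a) - (m - a)) by omega, pvItp_add, hr]
      exact pvItp_root u h _
    have hx : pvItp u a i = pvItp u m i := by rw [← hper, this]
    have : pvIsRoot u (pvItp u a i) := by rw [hx]; exact h
    exact pvShrink_le han this

theorem pvShrink {u : List Nat} {n : Nat} (hb : ∀ x < n, pvPar u x < n)
    {i : Nat} (hi : i < n) {m : Nat} (h : pvIsRoot u (pvItp u m i)) :
    pvIsRoot u (pvItp u n i) := by
  rcases Nat.le_total m n with hmn | hnm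
  · exact pvShrink_le hmn h
  · -- pigeonhole: two equal values among pvItp u 0..n i, all < n
    have hmaps : ∀ k ∈ Finset.range (n+1), pvItp u k i ∈ Finset.range n := by
      intro k _
      exact Finset.mem_range.mpr (pvItp_lt hb hi k)
    obtain ⟨a, ha, b, hbm, hab, heq⟩ :=
      Finset.exists_ne_map_eq_of_card_lt_of_maps_to
        (by simp) hmaps
    -- wlog a < b
    rcases Nat.lt_or_ge a b with hlt | hge
    · exact pvShrink_aux hb hi h (Nat.lt_succ_iff.mp (Finset.mem_range.mp ha)) hlt heq
    · have hlt : b < a := by omega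
      exact pvShrink_aux hb hi h (Nat.lt_succ_iff.mp (Finset.mem_range.mp hbm)) hlt heq.symm

theorem pvPar_set (u : List Nat) (p q x : Nat) (hp : p < u.length) :
    pvPar (u.set p q) x = if x = p then q else pvPar u x := by
  by_cases hx : x = p
  · subst hx; simp [pvPar, List.getD, List.getElem?_set_self hp]
  · simp [pvPar, List.getD, List.getElem?_set_ne (show p ≠ x from fun h => hx h.symm), hx]

theorem pvGL_CL {u : List Nat} {n p q : Nat} (hG : pvGood u n) (hp : p < n) (hq : q < n)
    (hqr : pvIsRoot u q) (hroot : pvIsRoot u p ∨ pvItp u n p = q) :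
    ∀ k j, j < n → pvIsRoot u (pvItp u k j) →
      ∃ m, pvItp (u.set p q) m j = (if pvItp u k j = pvItp u n p then q else pvItp u k j)
        ∧ pvIsRoot (u.set p q) (pvItp (u.set p q) m j) := by
  have hplen : p < u.length := by rw [hG.1]; exact hp
  have hpar' : ∀ x, pvPar (u.set p q) x = if x = p then q else pvPar u x :=
    fun x => pvPar_set u p q x hplen
  have hq' : pvIsRoot (u.set p q) q := by
    unfold pvIsRoot; rw [hpar']
    by_cases hqp : q = p
    · simp [hqp]
    · simp [hqp]; exact hqr
  have hrootp : pvIsRoot u (pvItp u n p) := (hG.2 p hp).2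
  intro k
  induction k with
  | zero =>
      intro j hj hr
      by_cases hjp : j = p
      · subst hjp
        have hnp : pvItp u n j = j := pvItp_root u hr n
        refine ⟨1, ?_, ?_⟩
        · have h1 : pvItp (u.set j q) 1 j = q := by
            show pvItp (u.set j q) 0 (pvPar (u.set j q) j) = q
            rw [hpar']; simp [pvItp]
          rw [h1, hnp]; simp [pvItp]
        · show pvIsRoot (u.set j q) (pvItp (u.set j q) 1 j)
          have h1 : pvItp (u.set j q) 1 j = q := by
            show pvItp (u.set j q) 0 (pvPar (u.set j q) j) = q
            rw [hpar']; simp [pvItp]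
          rw [h1]; exact hq'
      · have hjr : pvIsRoot (u.set p q) j := by
          unfold pvIsRoot; rw [hpar']; simp [hjp]; exact hr
        refine ⟨0, ?_, hjr⟩
        show j = if pvItp u 0 j = pvItp u n p then q else pvItp u 0 j
        by_cases hc : pvItp u 0 j = pvItp u n p
        · rcases hroot with h1 | h2
          · exfalso; apply hjp
            have : pvItp u n p = p := pvItp_root u h1 n
            simpa [pvItp, this] using hc
          · simp only [if_pos hc]
            have : (j : Nat) = pvItp u n p := by simpa [pvItp] using hc
            rw [this, h2]
        · simp [pvItp] at hc; simp [pvItp, hc]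
  | succ k ih =>
      intro j hj hr
      by_cases hjp : j = p
      · subst hjp
        have heqn : pvItp u (k+1) j = pvItp u n j := pvRoot_unique u hr hrootp
        refine ⟨1, ?_, ?_⟩
        · have h1 : pvItp (u.set j q) 1 j = q := by
            show pvItp (u.set j q) 0 (pvPar (u.set j q) j) = q
            rw [hpar']; simp [pvItp]
          rw [h1, heqn]; simp
        · have h1 : pvItp (u.set j q) 1 j = q := by
            show pvItp (u.set j q) 0 (pvPar (u.set j q) j) = q
            rw [hpar']; simp [pvItp]
          rw [h1]; exact hq'
      · have hj1 : pvPar u j < n := (hG.2 j hj).1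
        have hr1 : pvIsRoot u (pvItp u k (pvPar u j)) := hr
        obtain ⟨m, hm, hmr⟩ := ih (pvPar u j) hj1 hr1
        refine ⟨m+1, ?_, ?_⟩
        · have hstep : pvItp (u.set p q) (m+1) j = pvItp (u.set p q) m (pvPar u j) := by
            have : pvItp (u.set p q) (m+1) j = pvItp (u.set p q) m (pvPar (u.set p q) j) := rfl
            rw [this, hpar']; simp [hjp]
          rw [hstep, hm]
          rfl
        · have hstep : pvItp (u.set p q) (m+1) j = pvItp (u.set p q) m (pvPar u j) := by
            have : pvItp (u.set p q) (m+1) j = pvItp (u.set p q) m (pvPar (u.set p q) j) := rfl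
            rw [this, hpar']; simp [hjp]
          rw [hstep]; exact hmr
theorem pvGL {
u : List Nat} {n p q : Nat} (hG : pvGood u n) (hp : p < n) (hq : q < n)
    (hqr : pvIsRoot u q) (hroot : pvIsRoot u p ∨ pvItp u n p = q) :
    pvGood (u.set p q) n ∧
      ∀ j < n, pvItp (u.set p q) n j =
        if pvItp u n j = pvItp u n p then q else pvItp u n j := by
  have hlen' : (u.set p q).length = n := by simp [hG.1]
  have hplen : p < u.length := by rw [hG.1]; exact hp
  have hb' : ∀ x < n, pvPar (u.set p q) x < n := by
    intro x hx
    rw [pvPar_set u p q x hplen]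
    by_cases hxp : x = p
    · simp [hxp, hq]
    · simp [hxp]; exact (hG.2 x hx).1
  have CL := pvGL_CL hG hp hq hqr hroot
  have hGood : pvGood (u.set p q) n := by
    refine ⟨hlen', fun j hj => ⟨hb' j hj, ?_⟩⟩
    obtain ⟨m, _, hmr⟩ := CL n j hj (hG.2 j hj).2
    exact pvShrink hb' hj hmr
  refine ⟨hGood, fun j hj => ?_⟩
  obtain ⟨m, hm, hmr⟩ := CL n j hj (hG.2 j hj).2
  have := pvRoot_unique (u.set p q) (hGood.2 j hj).2 hmr
  rw [this, hm]

theorem pvFind_spec {u : List Nat} {n : Nat} (hG : pvGood u n) {i : Nat} (hi : i < n)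
    {fuel : Nat} (hfuel : ∃ k, k < fuel ∧ pvIsRoot u (pvItp u k i)) :
    (pvFind fuel u i).2 = pvItp u n i ∧ pvGood (pvFind fuel u i).1 n ∧
      ∀ j < n, pvItp (pvFind fuel u i).1 n j = pvItp u n j := by
  induction fuel generalizing i with
  | zero => obtain ⟨k, hk, _⟩ := hfuel; omega
  | succ fuel ih =>
      by_cases hpi : u.getD i 0 = i
      · have hroot : pvIsRoot u i := hpi
        simp only [pvFind, hpi, if_pos rfl]
        exact ⟨(pvItp_root u hroot n).symm, hG, fun j _ => rfl⟩
      · simp only [pvFind, if_neg hpi]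
        rw [show u.getD i 0 = pvPar u i from rfl]
        obtain ⟨k, hk, hkr⟩ := hfuel
        have hk0 : k ≠ 0 := by
          intro h; subst h; exact hpi hkr
        obtain ⟨k', rfl⟩ : ∃ k', k = k' + 1 := ⟨k - 1, by omega⟩
        have hparent_lt : pvPar u i < n := (hG.2 i hi).1
        have hkr' : pvIsRoot u (pvItp u k' (pvPar u i)) := hkr
        obtain ⟨ih1, ih2, ih3⟩ := ih (i := pvPar u i) hparent_lt ⟨k', by omega, hkr'⟩
        have hri : pvItp u n (pvPar u i) = pvItp u n i := by
          have h1 : pvItp u n (pvPar u i) = pvItp u (n+1) i := rfl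
          have h2 : pvIsRoot u (pvItp u (n+1) i) :=
            pvShrink_le (Nat.le_succ n) (hG.2 i hi).2
          rw [h1]; exact (pvRoot_unique u (hG.2 i hi).2 h2).symm
        have hr_lt : pvItp u n i < n := pvItp_lt (fun x hx => (hG.2 x hx).1) hi n
        have hfr : (pvFind fuel u (pvPar u i)).2 = pvItp u n i := by rw [ih1, hri]
        have hisr : pvIsRoot (pvFind fuel u (pvPar u i)).1 (pvItp u n i) := by
          have h3 := ih3 (pvPar u i) hparent_lt
          have := (ih2.2 (pvPar u i) hparent_lt).2
          rw [h3, hri] at this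
          exact this
        have hGL := pvGL (p := pvPar u i) (q := pvItp u n i) ih2 hparent_lt hr_lt hisr
          (Or.inr (by rw [ih3 (pvPar u i) hparent_lt, hri]))
        refine ⟨by simp [hfr], by rw [hfr]; exact hGL.1, fun j hj => ?_⟩
        rw [hfr]
        rw [hGL.2 j hj]
        rw [ih3 j hj, ih3 (pvPar u i) hparent_lt, hri]
        by_cases hc : pvItp u n j = pvItp u n i
        · simp [hc]
        · simp [hc]


-- labels induced by the forest: the root of every node
def pvLab (u : List Nat) (n : Nat) : List Nat := (List.range n).map (fun k => pvItp u n k)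

theorem pvLab_getD {u : List Nat} {n i : Nat} (hi : i < n) :
    (pvLab u n).getD i 0 = pvItp u n i := by
  unfold pvLab
  rw [List.getD_eq_getElem?_getD, List.getElem?_map, List.getElem?_range hi]
  rfl

theorem pvCount_foldl (l : List (Char × Char)) (c : Int) :
    l.foldl (fun (cnt : Int) p => if p.1 ≠ p.2 then cnt + 1 else cnt) c
      = c + (l.countP (fun p => p.1 != p.2) : Int) := by
  induction l generalizing c with
  | nil => simp
  | cons p l ih =>
      rw [List.foldl_cons, ih, List.countP_cons]
      by_cases h : p.1 = p.2
      · simp [h]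
      · simp [h]
        push_cast
        ring

theorem pvSim_eq (a b : String) : pvSim a b = pvSimAlt a b := by
  unfold pvSim pvSimAlt
  rw [pvCount_foldl]
  rw [decide_eq_decide]
  push_cast
  omega

theorem pvPair_step {strs : List String} {n i j : Nat} (hi : i < n) (hj : j < n)
    {u lab : List Nat} (hG : pvGood u n) (hl : lab = pvLab u n) :
    pvGood (pvPairA strs n i j u) n ∧ pvPairB strs i j lab = pvLab (pvPairA strs n i j u) n := by
  obtain ⟨hf1r, hG1, hpres1⟩ := pvFind_spec hG hi ⟨n, Nat.lt_succ_self n, (hG.2 i hi).2⟩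
  obtain ⟨hf2r, hG2, hpres2⟩ := pvFind_spec hG1 hj ⟨n, Nat.lt_succ_self n, (hG1.2 j hj).2⟩
  have hbr : (pvFind (n+1) (pvFind (n+1) u i).1 j).2 = pvItp u n j := by
    rw [hf2r, hpres1 j hj]
  have hpres : ∀ k, k < n → pvItp (pvFind (n+1) (pvFind (n+1) u i).1 j).1 n k = pvItp u n k := by
    intro k hk; rw [hpres2 k hk, hpres1 k hk]
  have hlabi : lab.getD i 0 = pvItp u n i := by rw [hl]; exact pvLab_getD hi
  have hlabj : lab.getD j 0 = pvItp u n j := by rw [hl]; exact pvLab_getD hj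
  have hLab2 : pvLab (pvFind (n+1) (pvFind (n+1) u i).1 j).1 n = pvLab u n := by
    unfold pvLab
    exact List.map_congr_left (fun k hk => hpres k (List.mem_range.mp hk))
  unfold pvPairA pvPairB
  simp only [hf1r, hbr, hlabi, hlabj, ← pvSim_eq]
  by_cases hab : pvItp u n i = pvItp u n j
  · have h1 : ¬(pvItp u n i ≠ pvItp u n j) := by simp [hab]
    have h2 : ¬(pvItp u n i ≠ pvItp u n j ∧ pvSim (strs.getD i "") (strs.getD j "") = true) :=
      fun h => h.1 hab
    rw [if_neg h1, if_neg h2]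
    exact ⟨hG2, by rw [hl, hLab2]⟩
  · by_cases hsim : pvSim (strs.getD i "") (strs.getD j "") = true
    · -- merge
      have har_lt : pvItp u n i < n := pvItp_lt (fun x hx => (hG.2 x hx).1) hi n
      have hbr_lt : pvItp u n j < n := pvItp_lt (fun x hx => (hG.2 x hx).1) hj n
      have hisr_br : pvIsRoot (pvFind (n+1) (pvFind (n+1) u i).1 j).1 (pvItp u n j) := by
        have := (hG2.2 j hj).2
        rwa [hpres j hj] at this
      have har_rt : pvItp (pvFind (n+1) (pvFind (n+1) u i).1 j).1 n (pvItp u n i) = pvItp u n i := by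
        rw [hpres _ har_lt]
        exact pvItp_root u (hG.2 i hi).2 n
      have hisr_ar : pvIsRoot (pvFind (n+1) (pvFind (n+1) u i).1 j).1 (pvItp u n i) := by
        have := (hG2.2 _ har_lt).2
        rwa [har_rt] at this
      have hGL := pvGL (p := pvItp u n i) (q := pvItp u n j) hG2 har_lt hbr_lt hisr_br
        (Or.inl hisr_ar)
      rw [if_pos (show pvItp u n i ≠ pvItp u n j from hab), if_pos hsim,
        if_pos (show pvItp u n i ≠ pvItp u n j ∧ _ = true from ⟨hab, hsim⟩)]
      refine ⟨hGL.1, ?_⟩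
      rw [hl]
      unfold pvLab
      rw [List.map_map]
      apply List.map_congr_left
      intro k hk
      have hkn := List.mem_range.mp hk
      rw [hGL.2 k hkn, hpres k hkn, har_rt]
      rfl
    · rw [if_pos (show pvItp u n i ≠ pvItp u n j from hab), if_neg hsim,
        if_neg (show ¬(pvItp u n i ≠ pvItp u n j ∧ _ = true) from fun h => hsim h.2)]
      exact ⟨hG2, by rw [hl, hLab2]⟩

theorem pvFoldl_rel {α β γ : Type} (R : α → β → Prop) (fA : α → γ → α) (fB : β → γ → β) :
    ∀ (l : List γ) (a : α) (b : β), R a b →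
      (∀ x ∈ l, ∀ a b, R a b → R (fA a x) (fB b x)) →
      R (l.foldl fA a) (l.foldl fB b) := by
  intro l
  induction l with
  | nil => intro a b h _; exact h
  | cons x l ih =>
      intro a b h hstep
      exact ih (fA a x) (fB b x) (hstep x (List.mem_cons_self) a b h)
        (fun y hy => hstep y (List.mem_cons_of_mem x hy))

theorem pvFinal {n : Nat} (l : List Nat) :
    ∀ (u : List Nat) (s : PySem.Set Nat), pvGood u n → (∀ i ∈ l, i < n) →
    (l.foldl (fun (st : List Nat × PySem.Set Nat) i =>
        let f := pvFind (n+1) st.1 i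
        (f.1, PySem.Set.add st.2 f.2)) (u, s)).2
      = l.foldl (fun s i => PySem.Set.add s (pvItp u n i)) s := by
  induction l with
  | nil => intro u s _ _; rfl
  | cons i l ih =>
      intro u s hG hmem
      have hi : i < n := hmem i (List.mem_cons_self)
      obtain ⟨hfr, hG1, hpres⟩ := pvFind_spec hG hi ⟨n, Nat.lt_succ_self n, (hG.2 i hi).2⟩
      simp only [List.foldl_cons]
      rw [ih (pvFind (n+1) u i).1 (PySem.Set.add s (pvFind (n+1) u i).2) hG1
        (fun x hx => hmem x (List.mem_cons_of_mem i hx))]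
      rw [hfr]
      exact PySem.List.foldl_congr_mem l
        (fun s x => PySem.Set.add s (pvItp (pvFind (n+1) u i).1 n x))
        (fun s x => PySem.Set.add s (pvItp u n x))
        (PySem.Set.add s (pvItp u n i))
        (fun acc x hx => by
          show acc.add (pvItp (pvFind (n+1) u i).1 n x) = acc.add (pvItp u n x)
          rw [hpres x (hmem x (List.mem_cons_of_mem i hx))])

theorem pvGood_init (n : Nat) : pvGood (List.range n) n := by
  have hpar : ∀ i < n, pvPar (List.range n) i = i := by
    intro i hi
    simp [pvPar, List.getD, List.getElem?_range hi]
  refine ⟨List.length_range, fun i hi => ?_⟩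
  refine ⟨by rw [hpar i hi]; exact hi, ?_⟩
  rw [pvItp_root (List.range n) (hpar i hi) n]
  exact hpar i hi

theorem pvLab_init (n : Nat) : List.range n = pvLab (List.range n) n := by
  unfold pvLab
  rw [List.map_congr_left (g := id) (fun k hk => by
    rw [pvItp_root (List.range n) ?_ n]
    · rfl
    · simp [pvIsRoot, pvPar, List.getD, List.getElem?_range (List.mem_range.mp hk)])]
  simp

-- ===== VERDICT (by name: the statement is the Claim_ definition above) =====
theorem solution_527_3_1_spec : Claim_equal_solution_527_3_1 := by
  intro strs _
  unfold Spec_solution_527_3_1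
  simp only [solution_527_3_1, solution_527_3_1_alt]
  have main := pvFoldl_rel (fun u lab => pvGood u strs.length ∧ lab = pvLab u strs.length)
    (fun u i => (List.range' (i+1) (strs.length - (i+1))).foldl (fun u j => pvPairA strs strs.length i j u) u)
    (fun lab i => (List.range' (i+1) (strs.length - (i+1))).foldl (fun lab j => pvPairB strs i j lab) lab)
    (List.range strs.length) (List.range strs.length) (List.range strs.length)
    ⟨pvGood_init strs.length, pvLab_init strs.length⟩
    ?_
  · obtain ⟨hGU, hlabU⟩ := main
    rw [pvFinal (List.range strs.length) _ _ hGU (fun i hi => List.mem_range.mp hi)]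
    rw [hlabU]
    have : (List.range strs.length).foldl
        (fun s i => PySem.Set.add s (pvItp ((List.range strs.length).foldl
          (fun u i => (List.range' (i+1) (strs.length - (i+1))).foldl (fun u j => pvPairA strs strs.length i j u) u)
          (List.range strs.length)) strs.length i)) ([] : PySem.Set Nat)
        = PySem.Set.ofList (pvLab ((List.range strs.length).foldl
          (fun u i => (List.range' (i+1) (strs.length - (i+1))).foldl (fun u j => pvPairA strs strs.length i j u) u)
          (List.range strs.length)) strs.length) := by
      rw [PySem.Set.ofList_eq_foldl]
      unfold pvLab
      rw [List.foldl_map]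
    rw [this]
  · intro i hi u lab hR
    have hin : i < strs.length := List.mem_range.mp hi
    refine pvFoldl_rel (fun u lab => pvGood u strs.length ∧ lab = pvLab u strs.length)
      (fun u j => pvPairA strs strs.length i j u)
      (fun lab j => pvPairB strs i j lab)
      (List.range' (i+1) (strs.length - (i+1))) u lab hR ?_
    intro j hj a b hab
    have hjn : j < strs.length := by
      have := List.mem_range'_1.mp hj
      omega
    exact pvPair_step hin hjn hab.1 hab.2
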